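-- pv_equiv track=rewrite | github.com/apavlovskii/TEXT2SQL | DSR-SQL/DSR_Lite/utils/preprocessor/Get_table_mes_bigquery.py | get_formatted_examples_for_column
-- ===== SOURCE A (Python) =====
-- def format_value(value, max_len=50):
--     if value is None:
--         return None
--     if isinstance(value, bytearray):
--         processed_value = value.decode("utf-8", errors="ignore")
--     else:
--         processed_value = value
--     if isinstance(processed_value, str) and len(processed_value) > max_len:
--         return processed_value[:max_len-3] + '...'
--     return processed_value
--
-- def format_examples_string(example_vals: list) -> str:
--     if not example_vals:
--         return ""
--     string_parts = [str(val) for val in example_vals]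
--     return f"examples: [{', '.join(string_parts)}]"
--
-- def get_formatted_examples_for_column(column_name, sample_rows):
--     if not sample_rows:
--         return format_examples_string([])
--     unique_examples = set()
--     formatted_examples_list = []
--     for row in sample_rows:
--         if len(unique_examples) >= 3:
--             break
--         if isinstance(row, dict) and column_name in row:
--             original_value = row.get(column_name)
--             if original_value is not None:
--                 if str(original_value) not in unique_examples:
--                     unique_examples.add(str(original_value))
--                     formatted_examples_list.append(format_value(original_value))
--     return format_examples_string(formatted_examples_list)
-- ===== SOURCE B (Python) =====
-- def format_value(value, max_len=50):
--     if value is None: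
--         return None
--     if isinstance(value, bytearray):
--         processed_value = value.decode("utf-8", errors="ignore")
--     else:
--         processed_value = value
--     if isinstance(processed_value, str) and len(processed_value) > max_len:
--         return processed_value[:max_len-3] + '...'
--     return processed_value
--
-- def format_examples_string(example_vals: list) -> str:
--     if not example_vals:
--         return ""
--     string_parts = [str(val) for val in example_vals]
--     return f"examples: [{', '.join(string_parts)}]"
--
-- def _dedupe(values):
--     # recursive first-occurrence dedup keyed by str(): keep head, drop its later duplicates
--     if not values:
--         return []
--     head = values[0]
--     rest = [v for v in values[1:] if str(v) != str(head)]
--     return [head] + _dedupe(rest)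
--
-- def get_formatted_examples_for_column(column_name, sample_rows):
--     values = [row[column_name] for row in sample_rows
--               if isinstance(row, dict) and column_name in row
--               and row[column_name] is not None]
--     examples = [format_value(v) for v in _dedupe(values)[:3]]
--     return format_examples_string(examples)
-- ===== Notes on version B (the rewrite author's own statement) =====
-- stated objective: alternative
-- what changed: Replaces A's single stateful loop (set of seen strings, growing list, early break at 3) by three staged passes: a comprehension extracting all matching values, a recursive first-occurrence dedup that filters later duplicates of the head, then a slice of three formatted after the fact.
import Mathlib
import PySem

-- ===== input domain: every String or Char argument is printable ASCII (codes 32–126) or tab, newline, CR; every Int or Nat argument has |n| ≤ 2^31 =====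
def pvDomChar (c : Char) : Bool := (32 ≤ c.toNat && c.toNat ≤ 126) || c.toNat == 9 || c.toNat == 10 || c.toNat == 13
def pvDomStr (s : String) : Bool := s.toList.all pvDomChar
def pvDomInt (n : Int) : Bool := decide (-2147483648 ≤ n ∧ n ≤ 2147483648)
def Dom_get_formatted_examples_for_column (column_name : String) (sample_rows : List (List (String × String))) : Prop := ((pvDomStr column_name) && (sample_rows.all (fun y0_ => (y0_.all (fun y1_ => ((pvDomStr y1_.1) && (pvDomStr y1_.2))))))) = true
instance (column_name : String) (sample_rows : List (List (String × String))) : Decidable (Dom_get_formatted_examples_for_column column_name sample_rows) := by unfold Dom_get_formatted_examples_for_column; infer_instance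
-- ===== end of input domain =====

-- B replaces A's single stateful loop (seen-set, growing list, early break at 3) by three
-- staged passes: extract all matching values, recursive first-occurrence dedup, slice+format
-- (objective: alternative decomposition).

-- ===== PORT A =====
-- shared module helper format_value; values here are Strings (the bytearray/None branches
-- cannot fire on this typed domain), so only the string-truncation branch is ported
def pvFormatValue (value : String) : String :=
  if 50 < PySem.Str.len value then
    String.ofList (PySem.Chars.slice value.toList none (some 47)) ++ "..."
  else value

-- shared module helper format_examples_string; str(val) of a String is itself
def pvFormatExamplesString (example_vals : List String) : String :=
  match example_vals with
  | [] => ""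
  | _ => "examples: [" ++ PySem.Str.join ", " example_vals ++ "]"

-- A's loop: break once three unique values were collected; 'column_name in row' then
-- 'row.get(column_name)' is one first-match lookup; 'is not None' always holds for a present key
def pvAloop (cn : String) : List (List (String × String)) → PySem.Set String → List String → List String
  | [], _, acc => acc
  | row :: rest, uniq, acc =>
    if 3 ≤ PySem.Set.len uniq then acc
    else
      match (PySem.Dict.mk row).get? cn with
      | none => pvAloop cn rest uniq acc
      | some v =>
        if PySem.Set.contains uniq v then pvAloop cn rest uniq acc
        else pvAloop cn rest (PySem.Set.add uniq v) (acc ++ [pvFormatValue v])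

def get_formatted_examples_for_column (column_name : String) (sample_rows : List (List (String × String))) : String :=
  match sample_rows with
  | [] => pvFormatExamplesString []
  | _ => pvFormatExamplesString (pvAloop column_name sample_rows PySem.Set.empty [])

-- ===== PORT B =====
-- B: the comprehension extracting row[column_name] for every row where the key is present
def pvBvalues (cn : String) (rows : List (List (String × String))) : List String :=
  rows.filterMap (fun row => (PySem.Dict.mk row).get? cn)

-- B's recursive _dedupe: keep the head, filter its later duplicates, recurse on the rest
def pvBdedupe : List String → List String
  | [] => []
  | v :: rest => v :: pvBdedupe (rest.filter (fun u => u ≠ v))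
termination_by l => l.length
decreasing_by
  simp only [List.length_cons, Nat.lt_succ_iff, List.length_unattach]
  exact le_trans (List.length_filter_le _ _) (le_of_eq (List.length_attach ..))

def get_formatted_examples_for_column_alt (column_name : String) (sample_rows : List (List (String × String))) : String :=
  pvFormatExamplesString
    (((pvBdedupe (pvBvalues column_name sample_rows)).take 3).map pvFormatValue)

-- ===== PRECONDITION & SPEC =====
def Spec_get_formatted_examples_for_column (column_name : String) (sample_rows : List (List (String × String))) (out : String) : Prop := out = get_formatted_examples_for_column_alt column_name sample_rows
instance (column_name : String) (sample_rows : List (List (String × String))) (out : String) : Decidable (Spec_get_formatted_examples_for_column column_name sample_rows out) := by unfold Spec_get_formatted_examples_for_column; infer_instance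

-- ===== CLAIM (what is proved, stated in full; the proofs are below) =====
def Claim_equal_get_formatted_examples_for_column : Prop := ∀ (column_name : String) (sample_rows : List (List (String × String))), Dom_get_formatted_examples_for_column column_name sample_rows → Spec_get_formatted_examples_for_column column_name sample_rows (get_formatted_examples_for_column column_name sample_rows)

-- ===== LEMMAS AND PROOFS =====

-- the first-occurrence values not yet in `seen`, in encounter order (proof-only reference list)
def pvNew (cn : String) : List (List (String × String)) → List String → List String
  | [], _ => []
  | row :: rest, seen =>
    match (PySem.Dict.mk row).get? cn with
    | none => pvNew cn rest seen
    | some v => if v ∈ seen then pvNew cn rest seen else v :: pvNew cn rest (seen ++ [v])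

-- pvNew restated over the flat value list (proof-only)
def pvDS : List String → List String → List String
  | [], _ => []
  | v :: t, seen => if v ∈ seen then pvDS t seen else v :: pvDS t (seen ++ [v])

theorem pvAloop_cons_none (cn : String) (row : List (String × String))
    (rest : List (List (String × String))) (uniq : PySem.Set String) (acc : List String)
    (hbrk : ¬ 3 ≤ PySem.Set.len uniq) (h : (PySem.Dict.mk row).get? cn = none) :
    pvAloop cn (row :: rest) uniq acc = pvAloop cn rest uniq acc := by
  rw [pvAloop, if_neg hbrk, h]

theorem pvAloop_cons_some (cn : String) (row : List (String × String))
    (rest : List (List (String × String))) (uniq : PySem.Set String) (acc : List String)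
    (v : String) (hbrk : ¬ 3 ≤ PySem.Set.len uniq) (h : (PySem.Dict.mk row).get? cn = some v) :
    pvAloop cn (row :: rest) uniq acc
      = if PySem.Set.contains uniq v then pvAloop cn rest uniq acc
        else pvAloop cn rest (PySem.Set.add uniq v) (acc ++ [pvFormatValue v]) := by
  rw [pvAloop, if_neg hbrk, h]

theorem pvNew_cons_none (cn : String) (row : List (String × String))
    (rest : List (List (String × String))) (seen : List String)
    (h : (PySem.Dict.mk row).get? cn = none) :
    pvNew cn (row :: rest) seen = pvNew cn rest seen := by
  rw [pvNew, h]

theorem pvNew_cons_some (cn : String) (row : List (String × String))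
    (rest : List (List (String × String))) (seen : List String) (v : String)
    (h : (PySem.Dict.mk row).get? cn = some v) :
    pvNew cn (row :: rest) seen
      = if v ∈ seen then pvNew cn rest seen else v :: pvNew cn rest (seen ++ [v]) := by
  rw [pvNew, h]

theorem pvAloop_eq (cn : String) (rows : List (List (String × String))) :
    ∀ (s : List String), s.length ≤ 3 →
      pvAloop cn rows s (s.map pvFormatValue)
        = ((s ++ pvNew cn rows s).take 3).map pvFormatValue := by
  induction rows with
  | nil =>
    intro s h3
    simp [pvAloop, pvNew, List.take_of_length_le h3]
  | cons row rest ih =>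
    intro s h3
    by_cases hbrk : 3 ≤ PySem.Set.len s
    · have hlen : s.length = 3 := by
        simp only [PySem.Set.len] at hbrk; omega
      rw [pvAloop]
      simp only [hbrk, if_true]
      rw [← hlen, List.take_left]
    · have hslt : s.length < 3 := by
        simp only [PySem.Set.len] at hbrk; omega
      cases hget : (PySem.Dict.mk row).get? cn with
      | none =>
        rw [pvAloop_cons_none cn row rest s _ hbrk hget, pvNew_cons_none cn row rest s hget]
        exact ih s h3
      | some v =>
        rw [pvAloop_cons_some cn row rest s _ v hbrk hget, pvNew_cons_some cn row rest s v hget]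
        by_cases hmem : v ∈ s
        · have hc : PySem.Set.contains s v = true := by
            simpa [PySem.Set.contains] using hmem
          rw [if_pos hc, if_pos hmem]
          exact ih s h3
        · have hc : ¬ (PySem.Set.contains s v = true) := by
            simpa [PySem.Set.contains] using hmem
          have hadd : PySem.Set.add s v = s ++ [v] := by
            simp [PySem.Set.add, PySem.Set.contains] at hc ⊢
            intro hv; exact absurd hv hmem
          rw [if_neg hc, if_neg hmem, hadd]
          have hlen' : (s ++ [v]).length ≤ 3 := by simp; omega
          have hstep := ih (s ++ [v]) hlen'
          rw [List.map_append, show List.map pvFormatValue [v] = [pvFormatValue v] from rfl]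
            at hstep
          rw [show s ++ v :: pvNew cn rest (s ++ [v]) = s ++ [v] ++ pvNew cn rest (s ++ [v]) by
            simp]
          exact hstep

-- pvNew over the rows equals pvDS over the extracted value list
theorem pvNew_eq_pvDS (cn : String) (rows : List (List (String × String))) :
    ∀ (s : List String), pvNew cn rows s = pvDS (pvBvalues cn rows) s := by
  induction rows with
  | nil => intro s; simp [pvNew, pvBvalues, pvDS]
  | cons row rest ih =>
    intro s
    cases hget : (PySem.Dict.mk row).get? cn with
    | none =>
      rw [pvNew_cons_none cn row rest s hget]
      simp only [pvBvalues, List.filterMap_cons, hget]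
      exact ih s
    | some v =>
      rw [pvNew_cons_some cn row rest s v hget]
      simp only [pvBvalues, List.filterMap_cons, hget, pvDS]
      by_cases hmem : v ∈ s
      · rw [if_pos hmem, if_pos hmem]; exact ih s
      · rw [if_neg hmem, if_neg hmem, ih (s ++ [v])]
        rfl

theorem pvBdedupe_nil : pvBdedupe ([] : List String) = [] := by
  rw [pvBdedupe.eq_def]

theorem pvBdedupe_cons (v : String) (rest : List String) :
    pvBdedupe (v :: rest) = v :: pvBdedupe (rest.filter (fun u => u ≠ v)) := by
  rw [pvBdedupe.eq_def]

-- pvDS equals B's recursive dedupe applied after filtering out the already-seen values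
theorem pvDS_eq_dedupe (l : List String) :
    ∀ (s : List String), pvDS l s = pvBdedupe (l.filter (fun u => decide (u ∉ s))) := by
  induction l with
  | nil => intro s; simp [pvDS, pvBdedupe]
  | cons v t ih =>
    intro s
    by_cases hmem : v ∈ s
    · rw [pvDS, if_pos hmem]
      simp only [List.filter_cons, hmem, not_true, decide_false]
      exact ih s
    · rw [pvDS, if_neg hmem]
      simp only [List.filter_cons, hmem, not_false_iff, decide_true, if_true]
      rw [pvBdedupe_cons, List.filter_filter]
      rw [ih (s ++ [v])]
      congr 1
      congr 1
      apply List.filter_congr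
      intro u _
      simp [List.mem_append, and_comm, eq_comm]

-- ===== VERDICT (by name: the statement is the Claim_ definition above) =====
theorem get_formatted_examples_for_column_spec : Claim_equal_get_formatted_examples_for_column := by
  intro cn rows _
  unfold Spec_get_formatted_examples_for_column
  cases rows with
  | nil =>
    simp [get_formatted_examples_for_column, get_formatted_examples_for_column_alt,
      pvBvalues, pvBdedupe_nil, pvFormatExamplesString]
  | cons r rs =>
    show pvFormatExamplesString (pvAloop cn (r :: rs) PySem.Set.empty [])
      = get_formatted_examples_for_column_alt cn (r :: rs)
    have hA : pvAloop cn (r :: rs) PySem.Set.empty []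
        = ((pvNew cn (r :: rs) []).take 3).map pvFormatValue := by
      have := pvAloop_eq cn (r :: rs) [] (by simp)
      simpa using this
    have hB : pvNew cn (r :: rs) [] = pvBdedupe (pvBvalues cn (r :: rs)) := by
      rw [pvNew_eq_pvDS cn (r :: rs) [], pvDS_eq_dedupe]
      simp
    rw [get_formatted_examples_for_column_alt, hA, hB]
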